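-- pv_equiv track=rewrite | github.com/bazaartechnologies/techradar | data-etl/src/classifier.py | _infer_quadrant
-- ===== SOURCE A (Python) =====
-- def _infer_quadrant(tech_name: str) -> int:
--     """
--     Infer quadrant from technology name (fallback).
--
--     Args:
--         tech_name: Technology name
--
--     Returns:
--         Quadrant number (0-3)
--     """
--     tech_lower = tech_name.lower()
--
--     # Languages & Frameworks
--     languages = ['python', 'javascript', 'typescript', 'java', 'go', 'rust', 'php', 'ruby', 'c++', 'c#']
--     frameworks = ['react', 'vue', 'angular', 'django', 'flask', 'express', 'next.js', 'rails', 'laravel']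
--
--     if any(lang in tech_lower for lang in languages + frameworks):
--         return 3
--
--     # Platforms
--     platforms = ['docker', 'kubernetes', 'aws', 'azure', 'gcp', 'postgres', 'mysql', 'mongodb', 'redis']
--     if any(plat in tech_lower for plat in platforms):
--         return 2
--
--     # Tools
--     tools = ['webpack', 'vite', 'jest', 'pytest', 'eslint', 'prettier', 'github', 'gitlab', 'jenkins']
--     if any(tool in tech_lower for tool in tools):
--         return 1
--
--     # Default to Techniques
--     return 0
-- ===== SOURCE B (Python) =====
-- _KEYWORD_QUADRANT = {
--     'python': 3, 'javascript': 3, 'typescript': 3, 'java': 3, 'go': 3,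
--     'rust': 3, 'php': 3, 'ruby': 3, 'c++': 3, 'c#': 3,
--     'react': 3, 'vue': 3, 'angular': 3, 'django': 3, 'flask': 3,
--     'express': 3, 'next.js': 3, 'rails': 3, 'laravel': 3,
--     'docker': 2, 'kubernetes': 2, 'aws': 2, 'azure': 2, 'gcp': 2,
--     'postgres': 2, 'mysql': 2, 'mongodb': 2, 'redis': 2,
--     'webpack': 1, 'vite': 1, 'jest': 1, 'pytest': 1, 'eslint': 1,
--     'prettier': 1, 'github': 1, 'gitlab': 1, 'jenkins': 1,
-- }
--
--
-- def _infer_quadrant(tech_name: str) -> int: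
--     """Single scan over the lowered name: at each offset, match every keyword
--     with startswith against a keyword->quadrant map, keeping the running max."""
--     s = tech_name.lower()
--     best = 0
--     for i in range(len(s)):
--         for kw, q in _KEYWORD_QUADRANT.items():
--             if s.startswith(kw, i):
--                 best = max(best, q)
--     return best
-- ===== Notes on version B (the rewrite author's own statement) =====
-- stated objective: alternative
-- what changed: Replaces the three-tier early-return cascade of per-keyword substring membership tests by a single left-to-right scan of the lowered name that, at each offset, matches every keyword of one keyword-to-quadrant map with startswith and keeps the running maximum quadrant.
import Mathlib
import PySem

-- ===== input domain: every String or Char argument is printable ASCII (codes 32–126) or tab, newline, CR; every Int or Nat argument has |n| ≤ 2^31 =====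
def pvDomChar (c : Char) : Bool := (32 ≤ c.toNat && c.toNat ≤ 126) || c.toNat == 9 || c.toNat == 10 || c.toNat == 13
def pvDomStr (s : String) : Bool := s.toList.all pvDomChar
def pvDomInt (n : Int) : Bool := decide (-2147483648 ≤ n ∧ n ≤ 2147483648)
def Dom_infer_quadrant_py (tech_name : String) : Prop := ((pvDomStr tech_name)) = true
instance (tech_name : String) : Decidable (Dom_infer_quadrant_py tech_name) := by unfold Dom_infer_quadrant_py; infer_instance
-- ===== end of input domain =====

-- B replaces A's three-tier early-return substring cascade by a single scan over the
-- lowered name's offsets, matching every keyword of one keyword->quadrant table with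
-- startswith and keeping the running maximum quadrant (objective: alternative).


-- ===== PORT A =====
def infer_quadrant_py (tech_name : String) : Int :=
  let tech_lower := PySem.Str.lower tech_name
  let languages := ["python", "javascript", "typescript", "java", "go", "rust", "php", "ruby", "c++", "c#"]
  let frameworks := ["react", "vue", "angular", "django", "flask", "express", "next.js", "rails", "laravel"]
  if (languages ++ frameworks).any (fun lang => PySem.Str.isIn lang tech_lower) then 3
  else
    let platforms := ["docker", "kubernetes", "aws", "azure", "gcp", "postgres", "mysql", "mongodb", "redis"]
    if platforms.any (fun plat => PySem.Str.isIn plat tech_lower) then 2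
    else
      let tools := ["webpack", "vite", "jest", "pytest", "eslint", "prettier", "github", "gitlab", "jenkins"]
      if tools.any (fun tool => PySem.Str.isIn tool tech_lower) then 1
      else 0

-- ===== PORT B =====
-- B's module-level keyword -> quadrant map (insertion order kept, as in Source B).
def pvKeywordQuadrant : List (String × Int) :=
  [("python", 3), ("javascript", 3), ("typescript", 3), ("java", 3), ("go", 3),
   ("rust", 3), ("php", 3), ("ruby", 3), ("c++", 3), ("c#", 3),
   ("react", 3), ("vue", 3), ("angular", 3), ("django", 3), ("flask", 3),
   ("express", 3), ("next.js", 3), ("rails", 3), ("laravel", 3),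
   ("docker", 2), ("kubernetes", 2), ("aws", 2), ("azure", 2), ("gcp", 2),
   ("postgres", 2), ("mysql", 2), ("mongodb", 2), ("redis", 2),
   ("webpack", 1), ("vite", 1), ("jest", 1), ("pytest", 1), ("eslint", 1),
   ("prettier", 1), ("github", 1), ("gitlab", 1), ("jenkins", 1)]

-- s.startswith(kw, i) for 0 ≤ i < len(s) is exactly kw <+: prefix of s[i:], i.e.
-- Chars.startswith on the dropped char list (exact on this index range).
def infer_quadrant_py_alt (tech_name : String) : Int :=
  let cs := (PySem.Str.lower tech_name).toList
  (List.range cs.length).foldl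
    (fun best i =>
      pvKeywordQuadrant.foldl
        (fun b kq => if PySem.Chars.startswith (cs.drop i) kq.1.toList then max b kq.2 else b)
        best)
    0

-- ===== PRECONDITION & SPEC =====
def Spec_infer_quadrant_py (tech_name : String) (out : Int) : Prop := out = infer_quadrant_py_alt tech_name
instance (tech_name : String) (out : Int) : Decidable (Spec_infer_quadrant_py tech_name out) := by unfold Spec_infer_quadrant_py; infer_instance

-- ===== CLAIM =====
def Claim_equal_infer_quadrant_py : Prop := ∀ (tech_name : String), Dom_infer_quadrant_py tech_name → Spec_infer_quadrant_py tech_name (infer_quadrant_py tech_name)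


-- ===== LEMMAS AND PROOFS =====

-- the accumulator of a "conditional running max" fold never decreases
theorem pv_foldl_ge {A : Type} (p : A → Bool) (f : A → Int) :
    ∀ (L : List A) (b0 : Int), b0 ≤ L.foldl (fun b x => if p x then max b (f x) else b) b0 := by
  intro L
  induction L with
  | nil => intro b0; simp
  | cons a L ih =>
    intro b0
    simp only [List.foldl_cons]
    refine le_trans ?_ (ih _)
    split <;> simp

-- every matched element's value is a lower bound of the fold's result
theorem pv_foldl_mem {A : Type} (p : A → Bool) (f : A → Int) :
    ∀ (L : List A) (b0 : Int) (x : A), x ∈ L → p x = true →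
      f x ≤ L.foldl (fun b x => if p x then max b (f x) else b) b0 := by
  intro L
  induction L with
  | nil => intro b0 x hx; simp at hx
  | cons a L ih =>
    intro b0 x hx hp
    simp only [List.foldl_cons]
    rcases List.mem_cons.mp hx with h | h
    · subst h
      refine le_trans ?_ (pv_foldl_ge p f L _)
      simp [hp]
    · exact ih _ x h hp

-- the fold's result is the start value or some matched element's value
theorem pv_foldl_cases {A : Type} (p : A → Bool) (f : A → Int) :
    ∀ (L : List A) (b0 : Int),
      L.foldl (fun b x => if p x then max b (f x) else b) b0 = b0 ∨
      ∃ x ∈ L, p x = true ∧ L.foldl (fun b x => if p x then max b (f x) else b) b0 = f x := by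
  intro L
  induction L with
  | nil => intro b0; simp
  | cons a L ih =>
    intro b0
    simp only [List.foldl_cons]
    by_cases hp : p a = true
    · simp only [hp, if_true]
      rcases ih (max b0 (f a)) with h | ⟨x, hx, hpx, hres⟩
      · rcases max_cases b0 (f a) with ⟨hm, _⟩ | ⟨hm, _⟩
        · left; rw [h, hm]
        · right; exact ⟨a, List.mem_cons_self, hp, by rw [h, hm]⟩
      · right; exact ⟨x, List.mem_cons_of_mem _ hx, hpx, hres⟩
    · simp only [hp]
      rcases ih b0 with h | ⟨x, hx, hpx, hres⟩
      · left; exact h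
      · right; exact ⟨x, List.mem_cons_of_mem _ hx, hpx, hres⟩

-- a fold of folds is a fold over the flattened pair list
theorem pv_foldl_foldl {A B : Type} (h : Int → A × B → Int) (ys : List B) :
    ∀ (xs : List A) (b0 : Int),
      xs.foldl (fun b x => ys.foldl (fun b' y => h b' (x, y)) b) b0 =
      (xs.flatMap (fun x => ys.map (fun y => (x, y)))).foldl h b0 := by
  intro xs
  induction xs with
  | nil => intro b0; simp
  | cons a xs ih =>
    intro b0
    simp only [List.foldl_cons, List.flatMap_cons, List.foldl_append, List.foldl_map]
    exact ih _

-- B's nested loop, flattened to one fold over (offset, table-entry) pairs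
theorem pv_flatten (cs : List Char) :
    (List.range cs.length).foldl
      (fun best i =>
        pvKeywordQuadrant.foldl
          (fun b kq => if PySem.Chars.startswith (cs.drop i) kq.1.toList then max b kq.2 else b)
          best) 0
    = ((List.range cs.length).flatMap (fun i => pvKeywordQuadrant.map (fun kq => (i, kq)))).foldl
        (fun (b : Int) (z : Nat × (String × Int)) => if PySem.Chars.startswith (cs.drop z.1) z.2.1.toList then max b z.2.2 else b) 0 :=
  pv_foldl_foldl (fun (b : Int) (z : Nat × (String × Int)) => if PySem.Chars.startswith (cs.drop z.1) z.2.1.toList then max b z.2.2 else b) _ _ _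

-- a keyword matched at some offset is a substring
theorem pv_match_isIn (cs : List Char) (kw : List Char) (i : Nat)
    (h : PySem.Chars.startswith (cs.drop i) kw = true) :
    PySem.Chars.isIn kw cs = true :=
  (PySem.Chars.exists_prefix_drop_iff_isIn kw cs).mp
    ⟨i, (PySem.Chars.startswith_iff _ _).mp h⟩

-- a nonempty substring is matched at some offset i < len
theorem pv_isIn_match (cs : List Char) (kw : List Char) (hne : kw ≠ [])
    (h : PySem.Chars.isIn kw cs = true) :
    ∃ i < cs.length, PySem.Chars.startswith (cs.drop i) kw = true := by
  obtain ⟨j, hj⟩ := (PySem.Chars.exists_prefix_drop_iff_isIn kw cs).mpr h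
  by_cases hlt : j < cs.length
  · exact ⟨j, hlt, (PySem.Chars.startswith_iff _ _).mpr hj⟩
  · exfalso
    rw [List.drop_eq_nil_of_le (le_of_not_gt hlt)] at hj
    exact hne (List.prefix_nil.mp hj)


-- ===== VERDICT =====
set_option maxHeartbeats 1000000 in
theorem infer_quadrant_py_spec : Claim_equal_infer_quadrant_py := by
  intro tech_name _
  simp only [Spec_infer_quadrant_py, infer_quadrant_py, infer_quadrant_py_alt,
    List.cons_append, List.nil_append]
  generalize PySem.Str.lower tech_name = low
  rw [pv_flatten low.toList]
  set cs := low.toList with hcsdef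
  set pairs := (List.range cs.length).flatMap (fun i => pvKeywordQuadrant.map (fun kq => (i, kq))) with hpairs
  set R := pairs.foldl
    (fun (b : Int) (z : Nat × (String × Int)) => if PySem.Chars.startswith (cs.drop z.1) z.2.1.toList then max b z.2.2 else b) 0 with hR
  have hmemz : ∀ z ∈ pairs, z.1 < cs.length ∧ z.2 ∈ pvKeywordQuadrant := by
    intro z hz
    simp only [hpairs, List.mem_flatMap, List.mem_map, List.mem_range] at hz
    obtain ⟨i, hi, kq, hkq, hzeq⟩ := hz
    subst hzeq; exact ⟨hi, hkq⟩
  have hpair_of : ∀ kq ∈ pvKeywordQuadrant, ∀ i, i < cs.length → (i, kq) ∈ pairs := by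
    intro kq hkq i hi
    simp only [hpairs, List.mem_flatMap, List.mem_map, List.mem_range]
    exact ⟨i, hi, kq, hkq, rfl⟩
  have htab3 : ∀ kw ∈ (["python", "javascript", "typescript", "java", "go", "rust", "php", "ruby", "c++", "c#", "react", "vue", "angular", "django", "flask", "express", "next.js", "rails", "laravel"] : List String), (kw, (3 : Int)) ∈ pvKeywordQuadrant := by decide
  have htab2 : ∀ kw ∈ (["docker", "kubernetes", "aws", "azure", "gcp", "postgres", "mysql", "mongodb", "redis"] : List String), (kw, (2 : Int)) ∈ pvKeywordQuadrant := by decide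
  have htab1 : ∀ kw ∈ (["webpack", "vite", "jest", "pytest", "eslint", "prettier", "github", "gitlab", "jenkins"] : List String), (kw, (1 : Int)) ∈ pvKeywordQuadrant := by decide
  have hback : ∀ kq ∈ pvKeywordQuadrant,
      (kq.2 = 3 → kq.1 ∈ (["python", "javascript", "typescript", "java", "go", "rust", "php", "ruby", "c++", "c#", "react", "vue", "angular", "django", "flask", "express", "next.js", "rails", "laravel"] : List String)) ∧
      (kq.2 = 2 → kq.1 ∈ (["docker", "kubernetes", "aws", "azure", "gcp", "postgres", "mysql", "mongodb", "redis"] : List String)) ∧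
      (kq.2 = 1 → kq.1 ∈ (["webpack", "vite", "jest", "pytest", "eslint", "prettier", "github", "gitlab", "jenkins"] : List String)) ∧
      (kq.2 = 1 ∨ kq.2 = 2 ∨ kq.2 = 3) := by decide
  have hnelit : ∀ kw ∈ ((["python", "javascript", "typescript", "java", "go", "rust", "php", "ruby", "c++", "c#", "react", "vue", "angular", "django", "flask", "express", "next.js", "rails", "laravel"] ++ ["docker", "kubernetes", "aws", "azure", "gcp", "postgres", "mysql", "mongodb", "redis"] ++ ["webpack", "vite", "jest", "pytest", "eslint", "prettier", "github", "gitlab", "jenkins"]) : List String), kw.toList ≠ [] := by decide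
  -- a matched table entry's keyword is a substring of low (as a Str.isIn fact)
  have hmatched : ∀ z ∈ pairs,
      PySem.Chars.startswith (cs.drop z.1) z.2.1.toList = true →
      PySem.Str.isIn z.2.1 low = true := by
    intro z hz hst
    have := pv_match_isIn cs z.2.1.toList z.1 hst
    simpa [hcsdef] using this
  -- any table keyword that is a substring bounds R from below by its quadrant
  have hlow : ∀ (kw : String) (q : Int), (kw, q) ∈ pvKeywordQuadrant → kw.toList ≠ [] →
      PySem.Str.isIn kw low = true → q ≤ R := by
    intro kw q hkq hne hin
    have hin' : PySem.Chars.isIn kw.toList cs = true := by simpa [hcsdef] using hin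
    obtain ⟨i, hi, hst⟩ := pv_isIn_match cs kw.toList hne hin'
    exact pv_foldl_mem (fun (z : Nat × (String × Int)) => PySem.Chars.startswith (cs.drop z.1) z.2.1.toList)
      (fun z => (z.2.2 : Int)) pairs 0 (i, (kw, q)) (hpair_of (kw, q) hkq i hi) hst
  rcases pv_foldl_cases (fun (z : Nat × (String × Int)) => PySem.Chars.startswith (cs.drop z.1) z.2.1.toList)
      (fun z => (z.2.2 : Int)) pairs 0 with hres | ⟨z, hz, hpz, hres⟩
  · -- the fold stayed 0: no pair matched, so no keyword of any tier is a substring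
    have hres0 : R = 0 := hres
    have hnone : ∀ (kw : String) (q : Int), (kw, q) ∈ pvKeywordQuadrant → kw.toList ≠ [] →
        q ≤ 0 → PySem.Str.isIn kw low = true → False := by
      intro kw q hkq hne hq0 hin
      have hle := hlow kw q hkq hne hin
      have hq : q = 1 ∨ q = 2 ∨ q = 3 := (hback (kw, q) hkq).2.2.2
      omega
    have c3 : ¬ (((["python", "javascript", "typescript", "java", "go", "rust", "php", "ruby", "c++", "c#", "react", "vue", "angular", "django", "flask", "express", "next.js", "rails", "laravel"] : List String).any fun lang => PySem.Str.isIn lang low) = true) := by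
      intro h
      obtain ⟨kw, hkw, hin⟩ := List.any_eq_true.mp h
      exact hnone kw 3 (htab3 kw hkw) (hnelit kw (by exact List.mem_append_left _ (List.mem_append_left _ hkw)))
        (by rw [← hres0]; exact hlow kw 3 (htab3 kw hkw) (hnelit kw (by exact List.mem_append_left _ (List.mem_append_left _ hkw))) hin) hin
    have c2 : ¬ (((["docker", "kubernetes", "aws", "azure", "gcp", "postgres", "mysql", "mongodb", "redis"] : List String).any fun plat => PySem.Str.isIn plat low) = true) := by
      intro h
      obtain ⟨kw, hkw, hin⟩ := List.any_eq_true.mp h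
      exact hnone kw 2 (htab2 kw hkw) (hnelit kw (by exact List.mem_append_left _ (List.mem_append_right _ hkw)))
        (by rw [← hres0]; exact hlow kw 2 (htab2 kw hkw) (hnelit kw (by exact List.mem_append_left _ (List.mem_append_right _ hkw))) hin) hin
    have c1 : ¬ (((["webpack", "vite", "jest", "pytest", "eslint", "prettier", "github", "gitlab", "jenkins"] : List String).any fun tool => PySem.Str.isIn tool low) = true) := by
      intro h
      obtain ⟨kw, hkw, hin⟩ := List.any_eq_true.mp h
      exact hnone kw 1 (htab1 kw hkw) (hnelit kw (by exact List.mem_append_right _ hkw))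
        (by rw [← hres0]; exact hlow kw 1 (htab1 kw hkw) (hnelit kw (by exact List.mem_append_right _ hkw)) hin) hin
    rw [hres0, if_neg c3, if_neg c2, if_neg c1]
  · -- the fold returned some matched entry's value z.2.2 ∈ {1,2,3}
    have hresz : R = z.2.2 := hres
    obtain ⟨h3of, h2of, h1of, hq⟩ := hback z.2 (hmemz z hz).2
    have hinz : PySem.Str.isIn z.2.1 low = true := hmatched z hz hpz
    rw [hresz]
    rcases hq with hq | hq | hq
    · -- a tier-1 keyword matched; higher tiers cannot match, else R would exceed 1
      have c1 : ((["webpack", "vite", "jest", "pytest", "eslint", "prettier", "github", "gitlab", "jenkins"] : List String).any fun tool => PySem.Str.isIn tool low) = true := by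
        rw [List.any_eq_true]; exact ⟨z.2.1, h1of hq, hinz⟩
      by_cases c3 : ((["python", "javascript", "typescript", "java", "go", "rust", "php", "ruby", "c++", "c#", "react", "vue", "angular", "django", "flask", "express", "next.js", "rails", "laravel"] : List String).any fun lang => PySem.Str.isIn lang low) = true
      · obtain ⟨kw, hkw, hin⟩ := List.any_eq_true.mp c3
        have h3le := hlow kw 3 (htab3 kw hkw) (hnelit kw (by exact List.mem_append_left _ (List.mem_append_left _ hkw))) hin
        rw [hresz, hq] at h3le
        omega
      · by_cases c2 : ((["docker", "kubernetes", "aws", "azure", "gcp", "postgres", "mysql", "mongodb", "redis"] : List String).any fun plat => PySem.Str.isIn plat low) = true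
        · obtain ⟨kw, hkw, hin⟩ := List.any_eq_true.mp c2
          have h2le := hlow kw 2 (htab2 kw hkw) (hnelit kw (by exact List.mem_append_left _ (List.mem_append_right _ hkw))) hin
          rw [hresz, hq] at h2le
          omega
        · rw [if_neg c3, if_neg c2, if_pos c1]
          exact hq.symm
    · -- a tier-2 keyword matched; tier 3 cannot match, else R would exceed 2
      have c2 : ((["docker", "kubernetes", "aws", "azure", "gcp", "postgres", "mysql", "mongodb", "redis"] : List String).any fun plat => PySem.Str.isIn plat low) = true := by
        rw [List.any_eq_true]; exact ⟨z.2.1, h2of hq, hinz⟩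
      by_cases c3 : ((["python", "javascript", "typescript", "java", "go", "rust", "php", "ruby", "c++", "c#", "react", "vue", "angular", "django", "flask", "express", "next.js", "rails", "laravel"] : List String).any fun lang => PySem.Str.isIn lang low) = true
      · obtain ⟨kw, hkw, hin⟩ := List.any_eq_true.mp c3
        have h3le := hlow kw 3 (htab3 kw hkw) (hnelit kw (by exact List.mem_append_left _ (List.mem_append_left _ hkw))) hin
        rw [hresz, hq] at h3le
        omega
      · rw [if_neg c3, if_pos c2]
        exact hq.symm
    · -- a tier-3 keyword matched
      have c3 : ((["python", "javascript", "typescript", "java", "go", "rust", "php", "ruby", "c++", "c#", "react", "vue", "angular", "django", "flask", "express", "next.js", "rails", "laravel"] : List String).any fun lang => PySem.Str.isIn lang low) = true := by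
        rw [List.any_eq_true]; exact ⟨z.2.1, h3of hq, hinz⟩
      rw [if_pos c3]
      exact hq.symm
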